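-- pv_equiv track=rewrite | github.com/nikcholer/cryptic-solver | backend/app/runtime/adapter.py | _initials_candidates
-- ===== SOURCE A (Python) =====
-- def _initials_candidates(words: list[str], pattern: str) -> list[str]:
--     target_length = len(pattern)
--     candidates: list[str] = []
--     for start in range(len(words)):
--         for end in range(start + target_length, len(words) + 1):
--             window = words[start:end]
--             if len(window) != target_length:
--                 continue
--             initials = ''.join(word[0].upper() for word in window if word)
--             if len(initials) != target_length:
--                 continue
--             if _matches_pattern(initials, pattern) and initials not in candidates:
--                 candidates.append(initials)
--     return candidates
--
-- def _matches_pattern(answer: str, pattern: str) -> bool: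
--     if len(answer) < len(pattern):
--         return False
--     return all(expected == '.' or expected == actual for actual, expected in zip(answer, pattern))
-- ===== SOURCE B (Python) =====
-- def _initials_candidates(words: list[str], pattern: str) -> list[str]:
--     L = len(pattern)
--     # pass 1: maximal runs of consecutive non-empty words, as lists of uppercased first letters
--     runs: list[list[str]] = []
--     cur: list[str] = []
--     for w in words:
--         if w:
--             cur.append(w[0].upper())
--         elif cur:
--             runs.append(cur)
--             cur = []
--     if cur:
--         runs.append(cur)
--     # pass 2: slide a window of length L across each run, dedup with an order-preserving set
--     seen: set[str] = set()
--     out: list[str] = []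
--     for run in runs:
--         for i in range(len(run) - L + 1):
--             cand = ''.join(run[i:i + L])
--             if all(p == '.' or p == c for p, c in zip(pattern, cand)) and cand not in seen:
--                 seen.add(cand)
--                 out.append(cand)
--     return out
-- ===== Notes on version B (the rewrite author's own statement) =====
-- stated objective: faster
-- what changed: B first segments the words into maximal runs of consecutive non-empty words (stored as their uppercased first letters), then slides a length-L window inside each run with an order-preserving set for dedup, replacing A's nested start/end index scan that re-slices and re-joins every window and does a linear 'not in candidates' scan.
-- outside the precondition, e.g. on _initials_candidates([''], ''): A returns [''], B returns []
import Mathlib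
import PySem

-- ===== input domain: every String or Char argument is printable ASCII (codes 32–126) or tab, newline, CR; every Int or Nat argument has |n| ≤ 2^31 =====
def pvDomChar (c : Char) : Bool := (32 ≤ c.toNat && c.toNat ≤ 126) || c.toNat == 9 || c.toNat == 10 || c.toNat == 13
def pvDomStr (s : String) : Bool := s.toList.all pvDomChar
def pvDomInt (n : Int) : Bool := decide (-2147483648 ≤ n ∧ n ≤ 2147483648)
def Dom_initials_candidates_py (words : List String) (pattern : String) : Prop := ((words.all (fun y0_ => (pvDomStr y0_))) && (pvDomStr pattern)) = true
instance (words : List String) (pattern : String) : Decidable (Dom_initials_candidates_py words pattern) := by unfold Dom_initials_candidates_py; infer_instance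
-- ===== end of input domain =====

-- B segments the words into maximal runs of consecutive non-empty words and slides the window
-- inside each run with a set for dedup, replacing A's nested index scan; timing measures the speed-up.

-- ===== PORT A =====
def pyMatchesPattern (answer pattern : List Char) : Bool :=
  if answer.length < pattern.length then false
  else (answer.zip pattern).all (fun p => p.2 == '.' || p.2 == p.1)

def initials_candidates_py (words : List String) (pattern : String) : List String :=
  let L := pattern.toList.length
  (PySem.List.pyRange 0 (words.length : Int) 1).foldl (fun cands start =>
    (PySem.List.pyRange (start + (L : Int)) ((words.length : Int) + 1) 1).foldl (fun cands e =>
      let window := PySem.List.slice words (some start) (some e)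
      if window.length ≠ L then cands
      else
        -- ''.join(word[0].upper() for word in window if word); word[0] is guarded by 'if word', headD's default is never read
        let initials := (window.filter (fun w => w ≠ "")).map (fun w => PySem.Chars.upperChar (w.toList.headD ' '))
        if initials.length ≠ L then cands
        else if pyMatchesPattern initials pattern.toList && !(cands.contains (String.ofList initials)) then
          cands ++ [String.ofList initials]
        else cands) cands) []

-- ===== PORT B =====
def initials_candidates_py_alt (words : List String) (pattern : String) : List String :=
  let P := pattern.toList
  let L := P.length
  -- pass 1: maximal runs of consecutive non-empty words, as lists of uppercased first letters
  -- (cur.append(w[0].upper()) only runs under 'if w', so headD's default is never read)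
  let st := words.foldl (fun (st : List (List Char) × List Char) w =>
      if w ≠ "" then (st.1, st.2 ++ [PySem.Chars.upperChar (w.toList.headD ' ')])
      else if st.2 ≠ [] then (st.1 ++ [st.2], ([] : List Char))
      else st) (([] : List (List Char)), ([] : List Char))
  let runs := if st.2 ≠ [] then st.1 ++ [st.2] else st.1
  -- pass 2: slide a window of length L across each run, dedup with an order-preserving set
  let res := runs.foldl (fun (acc : PySem.Set String × List String) run =>
      (PySem.List.pyRange 0 ((run.length : Int) - (L : Int) + 1) 1).foldl (fun acc i =>
        let cand := String.ofList (PySem.List.slice run (some i) (some (i + (L : Int))))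
        if (P.zip cand.toList).all (fun p => p.1 == '.' || p.1 == p.2) && !(PySem.Set.contains acc.1 cand) then
          (PySem.Set.add acc.1 cand, acc.2 ++ [cand])
        else acc) acc) ((PySem.Set.empty : PySem.Set String), ([] : List String))
  res.2

-- ===== PRECONDITION & SPEC =====
-- Pre_ excludes one degenerate corner on which A still returns: an empty pattern together with a
-- nonempty list of all-empty words, where A's length-0 windows manufacture the accidental candidate ''
-- while B's run-based scan finds no runs and returns [].
def Pre_initials_candidates_py (words : List String) (pattern : String) : Prop :=
  ¬(pattern = "" ∧ words ≠ [] ∧ ∀ w ∈ words, w = "")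
instance (words : List String) (pattern : String) : Decidable (Pre_initials_candidates_py words pattern) := by unfold Pre_initials_candidates_py; infer_instance

def pvWitness_initials_candidates_py : List String × String := (["hello", "", "wide", "world"], "W.")

def Spec_initials_candidates_py (words : List String) (pattern : String) (out : List String) : Prop := out = initials_candidates_py_alt words pattern
instance (words : List String) (pattern : String) (out : List String) : Decidable (Spec_initials_candidates_py words pattern out) := by unfold Spec_initials_candidates_py; infer_instance

-- ===== CLAIM (what is proved, stated in full; the proofs are below) =====
def Claim_equal_initials_candidates_py : Prop := ∀ (words : List String) (pattern : String), Dom_initials_candidates_py words pattern → Pre_initials_candidates_py words pattern → Spec_initials_candidates_py words pattern (initials_candidates_py words pattern)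

-- ===== LEMMAS AND PROOFS =====

-- ---------- shared vocabulary ----------

-- the uppercased first letter of a word, or none for the empty word
def firstLetter (w : String) : Option Char :=
  match w.toList with
  | [] => none
  | c :: _ => some (PySem.Chars.upperChar c)

-- the dedup-append step both programs perform on a candidate window (a list of letters)
def dstep (P : List Char) (c : List String) (w : List Char) : List String :=
  if (P.zip w).all (fun p => p.1 == '.' || p.1 == p.2) && !(c.contains (String.ofList w)) then
    c ++ [String.ofList w]
  else c

-- the optional valid window of length L starting at k in the letter sequence
def winOf (L : Nat) (l : List (Option Char)) (k : Nat) : Option (List Char) :=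
  let w := (l.drop k).take L
  if none ∈ w then none else some w.reduceOption

-- A's candidate windows, in start order
def W (L : Nat) (l : List (Option Char)) : List (List Char) :=
  (List.range l.length).filterMap (fun k => if l.length < k + L then none else winOf L l k)

-- B's runs (maximal none-free segments), recursively, with the pending run cur
def R (cur : List Char) : List (Option Char) → List (List Char)
  | [] => if cur ≠ [] then [cur] else []
  | some c :: t => R (cur ++ [c]) t
  | none :: t => (if cur ≠ [] then [cur] else []) ++ R [] t

-- B's windows of one run
def slides (L : Nat) (r : List Char) : List (List Char) :=
  (List.range (r.length + 1 - L)).map (fun i => (r.drop i).take L)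

-- ---------- A as a dedup fold over W ----------

def Abody (words : List String) (P : List Char) (k : Nat) (cands : List String) : List String :=
  let L := P.length
  let window := (words.drop k).take L
  let initials := (window.filter (fun w => w ≠ "")).map (fun w => PySem.Chars.upperChar (w.toList.headD ' '))
  if initials.length ≠ L then cands
  else if pyMatchesPattern initials P && !(cands.contains (String.ofList initials)) then
    cands ++ [String.ofList initials]
  else cands

def Astep (words : List String) (P : List Char) (cands : List String) (k : Nat) : List String :=
  if k + P.length ≤ words.length then Abody words P k cands else cands

-- collapse of A's inner loop: only end = start + L survives the window-length check
lemma inner_collapse (words : List String) (P : List Char) (k : Nat) (cands : List String) :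
    (PySem.List.pyRange ((k : Int) + (P.length : Int)) ((words.length : Int) + 1) 1).foldl
      (fun cands e =>
        let window := PySem.List.slice words (some (k : Int)) (some e)
        if window.length ≠ P.length then cands
        else
          let initials := (window.filter (fun w => w ≠ "")).map (fun w => PySem.Chars.upperChar (w.toList.headD ' '))
          if initials.length ≠ P.length then cands
          else if pyMatchesPattern initials P && !(cands.contains (String.ofList initials)) then
            cands ++ [String.ofList initials]
          else cands) cands
    = Astep words P cands k := by
  by_cases h : k + P.length ≤ words.length
  · rw [PySem.List.pyRange_one_cons (show (k : Int) + (P.length : Int) < (words.length : Int) + 1 by omega)]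
    rw [List.foldl_cons]
    have hw : PySem.List.slice words (some (k : Int)) (some ((k : Int) + (P.length : Int)))
        = (words.drop k).take P.length := PySem.List.slice_natCast_add words k P.length
    have hwlen : ((words.drop k).take P.length).length = P.length := by
      simp only [List.length_take, List.length_drop]; omega
    simp only [hw, hwlen, ne_eq, not_true_eq_false, if_false]
    rw [PySem.List.foldl_congr_mem _ _ (fun acc _ => acc) _ ?tail, PySem.List.foldl_ignore]
    · simp [Astep, Abody, h]
    case tail =>
      intro acc e he
      obtain ⟨h1, h2⟩ := PySem.List.mem_pyRange_one.mp he
      have h0 : (0 : Int) ≤ e := by omega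
      have het : k + P.length + 1 ≤ e.toNat ∧ e.toNat ≤ words.length := by omega
      rw [PySem.List.slice_toNat words (by positivity) h0]
      have : (List.take (e.toNat - ((k : Int)).toNat) (List.drop ((k : Int)).toNat words)).length ≠ P.length := by
        simp only [List.length_take, List.length_drop, Int.toNat_natCast]
        omega
      simp only [this, not_false_eq_true, if_true]
  · rw [PySem.List.pyRange_one_eq_nil (show (words.length : Int) + 1 ≤ (k : Int) + (P.length : Int) by omega)]
    simp [Astep, h]

lemma A_eq (words : List String) (pattern : String) :
    initials_candidates_py words pattern
      = (List.range words.length).foldl (Astep words pattern.toList) [] := by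
  unfold initials_candidates_py
  simp only [PySem.List.pyRange_zero_nat, List.foldl_map]
  exact PySem.List.foldl_congr_mem _ _ _ _ (fun acc k _ => inner_collapse words pattern.toList k acc)

-- A's step at k is the dedup step on the valid window at k (if any)
lemma Astep_eq_winOf (words : List String) (P : List Char) (c : List String) (k : Nat) :
    Astep words P c k
      = match (if words.length < k + P.length then none else winOf P.length (words.map firstLetter) k) with
        | some b => dstep P c b
        | none => c := by
  by_cases h : k + P.length ≤ words.length
  · rw [if_neg (by omega)]
    rw [Astep, if_pos h, Abody]
    have hseg : ((words.map firstLetter).drop k).take P.length = ((words.drop k).take P.length).map firstLetter := by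
      rw [List.map_take, List.map_drop]
    have hwlen : ((words.drop k).take P.length).length = P.length := by
      simp only [List.length_take, List.length_drop]; omega
    set Wd := (words.drop k).take P.length with hW
    rw [winOf]
    simp only [hseg]
    by_cases hnone : none ∈ Wd.map firstLetter
    · -- some word in the window is empty: A's filtered initials are short, winOf is none
      rw [if_pos hnone]
      obtain ⟨w, hwmem, hwnone⟩ := List.mem_map.mp hnone
      have hw : w = "" := by
        cases hcl : w.toList with
        | nil => exact String.toList_eq_nil_iff.mp hcl
        | cons ch cs => rw [firstLetter, hcl] at hwnone; simp at hwnone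
      have hfl : ((Wd.filter (fun w => w ≠ "")).map (fun w => PySem.Chars.upperChar (w.toList.headD ' '))).length ≠ P.length := by
        rw [List.length_map]
        have hlt : (Wd.filter (fun w => w ≠ "")).length < Wd.length :=
          List.length_filter_lt_length_iff_exists.mpr ⟨w, hwmem, by simp [hw]⟩
        omega
      rw [if_pos hfl]
    · -- all window words nonempty: initials = reduceOption of the letters
      rw [if_neg hnone]
      have hne : ∀ w ∈ Wd, w ≠ "" := by
        intro w hwm hweq
        exact hnone (List.mem_map.mpr ⟨w, hwm, by rw [hweq]; rfl⟩)
      have hfilter : Wd.filter (fun w => w ≠ "") = Wd :=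
        List.filter_eq_self.mpr (by intro a ha; simpa using hne a ha)
      have hmap : Wd.map firstLetter
          = (Wd.map (fun w => PySem.Chars.upperChar (w.toList.headD ' '))).map some := by
        rw [List.map_map]
        apply List.map_congr_left
        intro w hwm
        cases hcl : w.toList with
        | nil => exact absurd (String.toList_eq_nil_iff.mp hcl) (hne w hwm)
        | cons ch cs => simp [firstLetter, hcl]
      have hred : (Wd.map firstLetter).reduceOption
          = Wd.map (fun w => PySem.Chars.upperChar (w.toList.headD ' ')) := by
        rw [hmap]
        generalize (Wd.map (fun w => PySem.Chars.upperChar (w.toList.headD ' '))) = I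
        induction I <;> simp_all [List.reduceOption]
      set I := Wd.map (fun w => PySem.Chars.upperChar (w.toList.headD ' ')) with hI
      have hIlen : I.length = P.length := by simp [hI, hwlen]
      simp only [hfilter, ← hI, hIlen, ne_eq, not_true_eq_false, if_false, hred, dstep]
      -- the two pattern checks agree on a length-L window
      have hmatch : pyMatchesPattern I P = (P.zip I).all (fun p => p.1 == '.' || p.1 == p.2) := by
        rw [pyMatchesPattern, if_neg (by omega), ← List.zip_swap P I, List.all_map]
        rfl
      rw [hmatch]
  · rw [if_pos (by omega), Astep, if_neg h]

-- A = dedup fold over its candidate-window list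
lemma A_as_fold (words : List String) (pattern : String) :
    initials_candidates_py words pattern
      = (W pattern.toList.length (words.map firstLetter)).foldl (dstep pattern.toList) [] := by
  rw [A_eq, W, List.foldl_filterMap]
  have hlen : (words.map firstLetter).length = words.length := by simp
  rw [hlen]
  exact PySem.List.foldl_congr_mem _ _ _ _ (fun c k _ => by
    rw [Astep_eq_winOf]
    cases (if words.length < k + pattern.toList.length then none
      else winOf pattern.toList.length (words.map firstLetter) k) <;> rfl)

-- ---------- B as a dedup fold over the runs' windows ----------

-- B's state after pass 1, folded with the pending run, equals rs ++ R cur l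
lemma runs_fold (l : List (Option Char)) (rs : List (List Char)) (cur : List Char) :
    (let st := l.foldl (fun (st : List (List Char) × List Char) o =>
        match o with
        | some ch => (st.1, st.2 ++ [ch])
        | none => if st.2 ≠ [] then (st.1 ++ [st.2], ([] : List Char)) else st) (rs, cur)
     if st.2 ≠ [] then st.1 ++ [st.2] else st.1)
    = rs ++ R cur l := by
  induction l generalizing rs cur with
  | nil => simp only [List.foldl_nil, R]; split <;> simp
  | cons o t ih =>
    cases o with
    | some c => simpa [R] using ih rs (cur ++ [c])
    | none =>
      by_cases hc : cur = []
      · simpa [R, hc] using ih rs []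
      · simpa [R, hc] using ih (rs ++ [cur]) []

-- pass 1 over words equals pass 1 over the letter sequence
lemma word_fold_eq_letter_fold (words : List String) (rs : List (List Char)) (cur : List Char) :
    words.foldl (fun (st : List (List Char) × List Char) w =>
        if w ≠ "" then (st.1, st.2 ++ [PySem.Chars.upperChar (w.toList.headD ' ')])
        else if st.2 ≠ [] then (st.1 ++ [st.2], ([] : List Char))
        else st) (rs, cur)
    = (words.map firstLetter).foldl (fun (st : List (List Char) × List Char) o =>
        match o with
        | some ch => (st.1, st.2 ++ [ch])
        | none => if st.2 ≠ [] then (st.1 ++ [st.2], ([] : List Char)) else st) (rs, cur) := by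
  rw [List.foldl_map]
  apply PySem.List.foldl_congr_mem
  intro st w _
  cases hcl : w.toList with
  | nil =>
    have hw : w = "" := String.toList_eq_nil_iff.mp hcl
    simp [hw, firstLetter]
  | cons c cs =>
    have hw : w ≠ "" := by
      intro hweq; rw [hweq] at hcl; simp at hcl
    simp [hw, firstLetter, hcl]

-- a fold whose step preserves the diagonal is a fold on the second component
lemma diag_foldl {ι : Type} (l : List ι)
    (S : PySem.Set String × List String → ι → PySem.Set String × List String)
    (g : List String → ι → List String) (c : List String)
    (h : ∀ c k, k ∈ l → S (c, c) k = (g c k, g c k)) :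
    l.foldl S (c, c) = (l.foldl g c, l.foldl g c) := by
  induction l generalizing c with
  | nil => simp
  | cons x xs ih =>
    simp only [List.foldl_cons, h c x (by simp)]
    exact ih _ (fun c k hkl => h c k (by simp [hkl]))

-- B's inner loop over one run, on a diagonal state, is the dedup fold over slides
lemma inner_eq (P : List Char) (r : List Char) (c : List String) :
    (PySem.List.pyRange 0 ((r.length : Int) - (P.length : Int) + 1) 1).foldl (fun acc i =>
        let cand := String.ofList (PySem.List.slice r (some i) (some (i + (P.length : Int))))
        if (P.zip cand.toList).all (fun p => p.1 == '.' || p.1 == p.2) && !(PySem.Set.contains acc.1 cand) then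
          (PySem.Set.add acc.1 cand, acc.2 ++ [cand])
        else acc) ((c : PySem.Set String), c)
    = ((slides P.length r).foldl (dstep P) c, (slides P.length r).foldl (dstep P) c) := by
  set L := P.length with hLdef
  by_cases hL : r.length + 1 ≤ L
  · have h0 : (r.length : Int) - (L : Int) + 1 ≤ 0 := by omega
    rw [PySem.List.pyRange_one_eq_nil (by omega)]
    have : r.length + 1 - L = 0 := by omega
    simp [slides, this]
  · have hcast : (r.length : Int) - (L : Int) + 1 = ((r.length + 1 - L : Nat) : Int) := by omega
    rw [hcast, PySem.List.pyRange_zero_nat, List.foldl_map, slides, List.foldl_map]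
    apply diag_foldl
    intro c i hi
    have hslice : PySem.List.slice r (some (i : Int)) (some ((i : Int) + (L : Int)))
        = (r.drop i).take L := PySem.List.slice_natCast_add r i L
    simp only [hslice, dstep, String.toList_ofList, PySem.Set.contains_eq_listContains]
    by_cases hg : ((P.zip ((r.drop i).take L)).all (fun p => p.1 == '.' || p.1 == p.2)
        && !(List.contains c (String.ofList ((r.drop i).take L)))) = true
    · rw [if_pos hg, if_pos hg]
      have hnm : String.ofList ((r.drop i).take L) ∉ c := by
        have := (Bool.and_eq_true _ _).mp hg |>.2
        simpa using this
      rw [PySem.Set.add_of_not_mem hnm]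
    · rw [if_neg hg, if_neg hg]

-- B = dedup fold over the concatenation of its runs' windows
lemma B_as_fold (words : List String) (pattern : String) :
    initials_candidates_py_alt words pattern
      = ((R [] (words.map firstLetter)).flatMap (slides pattern.toList.length)).foldl
          (dstep pattern.toList) [] := by
  unfold initials_candidates_py_alt
  rw [word_fold_eq_letter_fold]
  have hruns := runs_fold (words.map firstLetter) [] []
  simp only [List.nil_append] at hruns
  simp only [← hruns]
  rw [List.foldl_flatMap]
  have hd := diag_foldl
    (let st := (words.map firstLetter).foldl (fun (st : List (List Char) × List Char) o =>
        match o with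
        | some ch => (st.1, st.2 ++ [ch])
        | none => if st.2 ≠ [] then (st.1 ++ [st.2], ([] : List Char)) else st) ([], [])
     if st.2 ≠ [] then st.1 ++ [st.2] else st.1)
    (fun (acc : PySem.Set String × List String) run =>
      (PySem.List.pyRange 0 ((run.length : Int) - (pattern.toList.length : Int) + 1) 1).foldl (fun acc i =>
        let cand := String.ofList (PySem.List.slice run (some i) (some (i + (pattern.toList.length : Int))))
        if (pattern.toList.zip cand.toList).all (fun p => p.1 == '.' || p.1 == p.2) && !(PySem.Set.contains acc.1 cand) then
          (PySem.Set.add acc.1 cand, acc.2 ++ [cand])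
        else acc) acc)
    (fun c r => (slides pattern.toList.length r).foldl (dstep pattern.toList) c) []
    (fun c r _ => inner_eq pattern.toList r c)
  rw [show ((PySem.Set.empty : PySem.Set String), ([] : List String))
      = ((([] : List String) : PySem.Set String), ([] : List String)) from rfl, hd]

-- ---------- the central combinatorial identity (L ≥ 1) ----------

lemma W_nil (L : Nat) : W L [] = [] := by simp [W]

lemma filterMap_range_succ {A : Type} (f : Nat → Option A) (n : Nat) :
    (List.range (n+1)).filterMap f = (f 0).toList ++ (List.range n).filterMap (fun k => f (k+1)) := by
  rw [List.range_succ_eq_map, List.filterMap_cons]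
  cases h : f 0 <;> simp [List.filterMap_map]

lemma W_cons (L : Nat) (o : Option Char) (t : List (Option Char)) :
    W L (o :: t)
      = (if t.length + 1 < L then none else winOf L (o :: t) 0).toList ++ W L t := by
  rw [W, W, List.length_cons, filterMap_range_succ]
  congr 1
  · simp only [Nat.zero_add]
  · apply List.filterMap_congr
    intro k _
    have h2 : winOf L (o :: t) (k+1) = winOf L t k := by simp [winOf]
    by_cases hc : t.length < k + L
    · rw [if_pos (by omega), if_pos hc]
    · rw [if_neg (by omega), if_neg hc, h2]

lemma W_none (L : Nat) (hL : 0 < L) (t : List (Option Char)) :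
    W L (none :: t) = W L t := by
  rw [W_cons]
  have hwin : winOf L (none :: t) 0 = none := by
    have hmem : none ∈ (((none :: t) : List (Option Char)).take L) := by
      cases L with
      | zero => omega
      | succ m => simp [List.take_succ_cons]
    simp [winOf, hmem]
  rw [hwin]
  split <;> simp

lemma slides_nil_of_short (L : Nat) (r : List Char) (h : r.length < L) : slides L r = [] := by
  have : r.length + 1 - L = 0 := by omega
  simp [slides, this]

lemma slides_cons (L : Nat) (ch : Char) (r : List Char) (h : L ≤ r.length + 1) :
    slides L (ch :: r) = ((ch :: r).take L) :: slides L r := by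
  rw [slides, slides]
  have : (ch :: r).length + 1 - L = (r.length + 1 - L) + 1 := by
    simp only [List.length_cons]; omega
  rw [this, List.range_succ_eq_map, List.map_cons, List.map_map]
  congr 1

lemma none_not_mem_map_some (x : List Char) : (none : Option Char) ∉ x.map some := by
  intro hmem
  rcases List.mem_map.mp hmem with ⟨a, _, ha⟩
  exact Option.some_ne_none a ha

lemma reduceOption_map_some' (l : List Char) : (l.map some).reduceOption = l := by
  induction l <;> simp_all [List.reduceOption]

-- windows of a pure run: W over (map some cur) is exactly slides cur
lemma W_map_some (L : Nat) (hL : 0 < L) (cur : List Char) :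
    W L (cur.map some) = slides L cur := by
  induction cur with
  | nil =>
    rw [List.map_nil, W_nil]
    exact (slides_nil_of_short L [] (by simpa using hL)).symm
  | cons ch cur ih =>
    rw [List.map_cons, W_cons, ih]
    by_cases h : L ≤ cur.length + 1
    · rw [slides_cons L ch cur h]
      have hwin : winOf L (some ch :: cur.map some) 0 = some ((ch :: cur).take L) := by
        have htake : List.take L (some ch :: cur.map some) = (List.take L (ch :: cur)).map some := by
          rw [show (some ch :: cur.map some) = (ch :: cur).map some by simp, ← List.map_take]
        have hcond : (none : Option Char) ∉ List.take L (some ch :: cur.map some) := by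
          rw [htake]; exact none_not_mem_map_some _
        simp only [winOf, List.drop_zero]
        rw [if_neg hcond, htake, reduceOption_map_some']
      rw [if_neg (by simp only [List.length_map]; omega), hwin]
      simp
    · rw [slides_nil_of_short L (ch :: cur) (by simp only [List.length_cons]; omega),
        slides_nil_of_short L cur (by omega),
        if_pos (by simp only [List.length_map]; omega)]
      simp

-- splitting at the first none: W (map some cur ++ none :: t) = slides cur ++ W t
lemma W_split (L : Nat) (hL : 0 < L) (cur : List Char) (t : List (Option Char)) :
    W L (cur.map some ++ none :: t) = slides L cur ++ W L t := by
  induction cur with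
  | nil =>
    rw [List.map_nil, List.nil_append, W_none L hL,
      slides_nil_of_short L [] (by simpa using hL), List.nil_append]
  | cons ch cur ih =>
    rw [List.map_cons, List.cons_append, W_cons, ih]
    by_cases h : L ≤ cur.length + 1
    · -- the window at 0 stays inside the run
      rw [slides_cons L ch cur h]
      have hwin : winOf L (some ch :: (cur.map some ++ none :: t)) 0 = some ((ch :: cur).take L) := by
        have htake : List.take L (some ch :: (cur.map some ++ none :: t))
            = (List.take L (ch :: cur)).map some := by
          rw [show (some ch :: (cur.map some ++ none :: t)) = (ch :: cur).map some ++ (none :: t) by simp,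
            List.take_append_of_le_length (by simp only [List.length_map, List.length_cons]; omega),
            ← List.map_take]
        have hcond : (none : Option Char) ∉ List.take L (some ch :: (cur.map some ++ none :: t)) := by
          rw [htake]; exact none_not_mem_map_some _
        simp only [winOf, List.drop_zero]
        rw [if_neg hcond, htake, reduceOption_map_some']
      rw [if_neg (by simp only [List.length_append, List.length_map, List.length_cons]; omega), hwin]
      simp
    · -- the window at 0 (if it exists) crosses the none, both sides contribute nothing
      rw [slides_nil_of_short L (ch :: cur) (by simp only [List.length_cons]; omega),
        slides_nil_of_short L cur (by omega)]
      by_cases hc : (cur.map some ++ none :: t).length + 1 < L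
      · rw [if_pos hc]
        simp
      · rw [if_neg hc]
        have hwin : winOf L (some ch :: (cur.map some ++ none :: t)) 0 = none := by
          have hmem : none ∈ List.take L (some ch :: (cur.map some ++ none :: t)) := by
            rw [show (some ch :: (cur.map some ++ none :: t)) = (ch :: cur).map some ++ (none :: t) by simp,
              List.take_append]
            have hlen : ((ch :: cur).map some).length = cur.length + 1 := by simp
            apply List.mem_append_right
            have : 0 < L - ((ch :: cur).map some).length := by rw [hlen]; omega
            cases hEq : L - ((ch :: cur).map some).length with
            | zero => omega
            | succ m => simp [List.take_succ_cons]
          simp only [winOf, List.drop_zero]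
          rw [if_pos hmem]
        rw [hwin]
        simp

-- the runs' windows, concatenated, are exactly A's windows
lemma flatMap_R (L : Nat) (hL : 0 < L) (l : List (Option Char)) (cur : List Char) :
    (R cur l).flatMap (slides L) = W L (cur.map some ++ l) := by
  induction l generalizing cur with
  | nil =>
    rw [List.append_nil, W_map_some L hL, R]
    by_cases hc : cur = []
    · simp [hc, slides_nil_of_short L [] (by simpa using hL)]
    · simp [hc]
  | cons o t ih =>
    cases o with
    | some c =>
      rw [R, ih (cur ++ [c])]
      congr 1
      simp
    | none =>
      rw [R, List.flatMap_append, ih [], List.map_nil, List.nil_append, W_split L hL]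
      by_cases hc : cur = []
      · simp [hc, slides_nil_of_short L [] (by simpa using hL)]
      · simp [hc]

-- ---------- the degenerate empty-pattern case ----------

lemma dstep_nil_nil (c : List String) :
    dstep [] c [] = if "" ∈ c then c else c ++ [""] := by
  have hofl : String.ofList ([] : List Char) = "" := rfl
  rw [dstep, hofl]
  by_cases h : "" ∈ c
  · rw [if_pos h, if_neg (by simp [h])]
  · rw [if_neg h, if_pos (by simp [h])]

lemma fold_skip (ws : List (List Char)) (c : List String) (hc : "" ∈ c)
    (h : ∀ x ∈ ws, x = ([] : List Char)) : ws.foldl (dstep []) c = c := by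
  induction ws with
  | nil => rfl
  | cons x t ih =>
    rw [List.foldl_cons, h x (by simp), dstep_nil_nil, if_pos hc]
    exact ih (fun y hy => h y (by simp [hy]))

lemma fold_all_nil (ws : List (List Char)) (h : ∀ x ∈ ws, x = ([] : List Char)) :
    ws.foldl (dstep []) [] = if ws = [] then [] else [""] := by
  cases ws with
  | nil => rfl
  | cons x t =>
    rw [List.foldl_cons, h x (by simp), dstep_nil_nil, if_neg (by simp), List.nil_append,
      if_neg (by simp)]
    exact fold_skip t [""] (by simp) (fun y hy => h y (by simp [hy]))

lemma W_zero_mem (l : List (Option Char)) (x : List Char) (hx : x ∈ W 0 l) : x = [] := by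
  rw [W] at hx
  obtain ⟨k, _, hk⟩ := List.mem_filterMap.mp hx
  by_cases h : l.length < k + 0
  · rw [if_pos h] at hk; exact absurd hk (by simp)
  · rw [if_neg h] at hk
    rw [winOf] at hk
    simp only [List.take_zero] at hk
    rw [if_neg (by simp)] at hk
    simpa [List.reduceOption] using hk.symm

lemma W_zero_ne_nil (l : List (Option Char)) (hl : l ≠ []) : W 0 l ≠ [] := by
  cases l with
  | nil => exact absurd rfl hl
  | cons o t =>
    rw [W_cons]
    have hwin : winOf 0 (o :: t) 0 = some [] := by
      rw [winOf]; simp [List.reduceOption]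
    rw [if_neg (by omega), hwin]
    simp

lemma slides_zero_mem (r : List Char) (x : List Char) (hx : x ∈ slides 0 r) : x = [] := by
  rw [slides] at hx
  obtain ⟨i, _, hi⟩ := List.mem_map.mp hx
  simpa using hi.symm

lemma slides_zero_ne_nil (r : List Char) : slides 0 r ≠ [] := by
  rw [slides]
  simp

lemma R_ne_nil (l : List (Option Char)) (cur : List Char)
    (h : (∃ o ∈ l, o ≠ none) ∨ cur ≠ []) : R cur l ≠ [] := by
  induction l generalizing cur with
  | nil =>
    rcases h with ⟨o, ho, _⟩ | hc
    · exact absurd ho (by simp)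
    · rw [R, if_pos hc]; simp
  | cons o t ih =>
    cases o with
    | some c => rw [R]; exact ih (cur ++ [c]) (Or.inr (by simp))
    | none =>
      rw [R]
      rcases h with ⟨o', ho', hne⟩ | hc
      · rcases List.mem_cons.mp ho' with h1 | h2
        · exact absurd h1 (by simpa using hne)
        · have := ih [] (Or.inl ⟨o', h2, hne⟩)
          intro hAbs
          exact this (List.append_eq_nil_iff.mp hAbs).2
      · rw [if_pos hc]
        simp

-- ===== VERDICT (by name: the statement is the Claim_ definition above) =====
theorem initials_candidates_py_spec : Claim_equal_initials_candidates_py := by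
  intro words pattern _ hpre
  unfold Spec_initials_candidates_py
  rw [A_as_fold, B_as_fold]
  by_cases hL : pattern.toList.length = 0
  · -- empty pattern: both folds act on lists of empty windows
    have hP : pattern.toList = [] := List.length_eq_zero_iff.mp hL
    have hpat : pattern = "" := by
      have := String.toList_eq_nil_iff.mp hP
      simpa using this
    rw [hL, hP]
    rw [fold_all_nil _ (W_zero_mem _),
      fold_all_nil _ (fun x hx => by
        obtain ⟨r, _, hr⟩ := List.mem_flatMap.mp hx
        exact slides_zero_mem r x hr)]
    rcases List.eq_nil_or_concat' words with hwnil | ⟨ws', w', hws⟩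
    · subst hwnil; rfl
    · -- words nonempty: Pre_ provides a nonempty word, so both sides have a window
      have hwne : words ≠ [] := by rw [hws]; simp
      have hex : ∃ w ∈ words, w ≠ "" := by
        by_contra hno
        push Not at hno
        exact hpre ⟨hpat, hwne, hno⟩
      obtain ⟨w, hwmem, hwne'⟩ := hex
      have hWne : W 0 (words.map firstLetter) ≠ [] :=
        W_zero_ne_nil _ (by simpa using hwne)
      have hsome : ∃ o ∈ words.map firstLetter, o ≠ none := by
        refine ⟨firstLetter w, List.mem_map.mpr ⟨w, hwmem, rfl⟩, ?_⟩
        cases hcl : w.toList with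
        | nil => exact absurd (String.toList_eq_nil_iff.mp hcl) hwne'
        | cons c cs => simp [firstLetter, hcl]
      have hRne : R [] (words.map firstLetter) ≠ [] := R_ne_nil _ [] (Or.inl hsome)
      have hflat : (R [] (words.map firstLetter)).flatMap (slides 0) ≠ [] := by
        intro hAbs
        rcases List.ne_nil_iff_exists_cons.mp hRne with ⟨r, rs, hr⟩
        rw [hr, List.flatMap_cons] at hAbs
        exact slides_zero_ne_nil r (List.append_eq_nil_iff.mp hAbs).1
      rw [if_neg hWne, if_neg hflat]
  · -- nonempty pattern: the runs' windows are exactly A's windows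
    rw [flatMap_R pattern.toList.length (by omega) (words.map firstLetter) []]
    simp
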